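-- pv_equiv track=rewrite | github.com/AsfandYarPaki/Tweet-Analyzer-Project-Python- | tweet project.py | is_mentioned
-- ===== SOURCE A (Python) =====
-- def is_mentioned(tweet, username):
--     """  Return True if and only if the tweet mentions that username
--     preceded by @. Note: if a tweet contains @dancing, then we would
--     consider username dan to be mentioned.
--
--     >>>is_mentioned('I am Asfand Yar and I am doing @programming right now', 'program')
--     True
--     >>>is_mentioned('I am Asfand Yar and I am doing programming right now', 'Asfand')
--     False
--     """
--
--
--     tweet = tweet.split()
--     for separately in tweet:
--         if separately[0] == '@':
--             if separately[1: (len(username)+1)] == username: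
--                 return True
--     else:
--         return False
-- ===== SOURCE B (Python) =====
-- def is_mentioned(tweet, username):
--     """Position scan: look for '@'+username starting at a whitespace boundary,
--     instead of splitting the tweet into a token list."""
--     if any(c.isspace() for c in username):
--         return False
--     target = '@' + username
--     m = len(target)
--     n = len(tweet)
--     for i in range(n - m + 1):
--         if (i == 0 or tweet[i - 1].isspace()) and tweet[i:i + m] == target:
--             return True
--     return False
-- ===== Notes on version B (the rewrite author's own statement) =====
-- stated objective: alternative
-- what changed: B scans character positions of the tweet directly, testing '@'+username at index 0 or after a whitespace character (after an upfront whitespace-in-username guard), instead of A's building the token list with split() and slicing each token.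
import Mathlib
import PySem

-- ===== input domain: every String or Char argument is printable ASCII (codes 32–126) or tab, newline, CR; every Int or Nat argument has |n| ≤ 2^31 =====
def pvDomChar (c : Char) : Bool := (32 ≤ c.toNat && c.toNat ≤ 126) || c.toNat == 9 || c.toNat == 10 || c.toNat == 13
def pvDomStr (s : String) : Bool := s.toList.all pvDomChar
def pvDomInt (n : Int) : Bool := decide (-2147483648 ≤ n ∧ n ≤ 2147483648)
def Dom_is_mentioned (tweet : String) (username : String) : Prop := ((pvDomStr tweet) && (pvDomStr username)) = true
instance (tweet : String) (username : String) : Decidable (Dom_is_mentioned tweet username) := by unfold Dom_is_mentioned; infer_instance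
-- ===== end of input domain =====

-- B replaces A's split-into-tokens scan by a direct position scan of the tweet for
-- '@'+username at a whitespace boundary (alternative algorithm, same return value).

-- ===== PORT A =====
-- A's 'for separately in tweet.split(): …' loop, with its early 'return True'
def isMentionedScanA (username : String) : List String → Bool
  | [] => false
  | separately :: rest =>
    if PySem.Str.pyGet? separately 0 = some '@' then
      if PySem.Str.slice separately (some 1) (some (PySem.Str.len username + 1)) = username then
        true
      else isMentionedScanA username rest
    else isMentionedScanA username rest

def is_mentioned (tweet : String) (username : String) : Bool :=
  isMentionedScanA username (PySem.Str.split₀ tweet)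

-- ===== PORT B =====
def is_mentioned_alt (tweet : String) (username : String) : Bool :=
  if username.toList.any PySem.Chars.isspace then false
  else
    let target := "@" ++ username
    let m := PySem.Str.len target
    let n := PySem.Str.len tweet
    -- the 'for i in range(n - m + 1)' search loop with its early 'return True'
    (PySem.List.pyRange 0 (n - m + 1) 1).any fun i =>
      (i == 0 || ((PySem.Str.pyGet? tweet (i - 1)).elim false PySem.Chars.isspace)) &&
      (PySem.Str.slice tweet (some i) (some (i + m)) == target)

-- ===== PRECONDITION & SPEC =====
def Spec_is_mentioned (tweet : String) (username : String) (out : Bool) : Prop := out = is_mentioned_alt tweet username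
instance (tweet : String) (username : String) (out : Bool) : Decidable (Spec_is_mentioned tweet username out) := by unfold Spec_is_mentioned; infer_instance

-- ===== CLAIM (what is proved, stated in full; the proofs are below) =====
def Claim_equal_is_mentioned : Prop := ∀ (tweet : String) (username : String), Dom_is_mentioned tweet username → Spec_is_mentioned tweet username (is_mentioned tweet username)

-- ===== LEMMAS AND PROOFS =====

def pvNonSp (c : Char) : Bool := !PySem.Chars.isspace c
def pvWords : List Char → List (List Char)
  | [] => []
  | c :: rest =>
    if PySem.Chars.isspace c then pvWords rest
    else (c :: rest.takeWhile pvNonSp) :: pvWords (rest.dropWhile pvNonSp)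
termination_by t => t.length
decreasing_by
  · simp
  · exact Nat.lt_succ_of_le (List.length_dropWhile_le _ _)

theorem go_eq (t : List Char) : ∀ (cur : List Char) (acc : List (List Char)),
    PySem.Chars.split₀.go t cur acc =
      acc.reverse ++ (if cur.isEmpty then pvWords t
        else (cur.reverse ++ t.takeWhile pvNonSp) :: pvWords (t.dropWhile pvNonSp)) := by
  induction t with
  | nil =>
    intro cur acc
    rw [PySem.Chars.split₀.go]
    cases cur <;> simp [pvWords]
  | cons c rest ih =>
    intro cur acc
    rw [PySem.Chars.split₀.go]
    by_cases hs : PySem.Chars.isspace c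
    · have hw : pvWords (c :: rest) = pvWords rest := by rw [pvWords]; simp [hs]
      have htw : (c :: rest).takeWhile pvNonSp = [] := by simp [pvNonSp, hs]
      have hdw : (c :: rest).dropWhile pvNonSp = c :: rest := by simp [pvNonSp, hs]
      cases cur with
      | nil => simp [hs, ih, hw]
      | cons x xs =>
        simp only [hs, if_true]
        rw [ih [] ((x :: xs).reverse :: acc)]
        simp [hw, htw, hdw]
    · have htw : (c :: rest).takeWhile pvNonSp = c :: rest.takeWhile pvNonSp := by
        simp [pvNonSp, hs]
      have hdw : (c :: rest).dropWhile pvNonSp = rest.dropWhile pvNonSp := by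
        simp [pvNonSp, hs]
      have hw : pvWords (c :: rest)
          = (c :: rest.takeWhile pvNonSp) :: pvWords (rest.dropWhile pvNonSp) := by
        rw [pvWords]; simp [hs]
      simp only [hs, if_false, Bool.false_eq_true]
      rw [ih (c :: cur) acc]
      cases cur <;> simp [htw, hdw, hw]

theorem split₀_eq_pvWords (t : List Char) : PySem.Chars.split₀ t = pvWords t := by
  show PySem.Chars.split₀.go t [] [] = _
  rw [go_eq]; simp

theorem pvWords_sound (t : List Char) : ∀ w ∈ pvWords t, w ≠ [] ∧ ∀ c ∈ w, PySem.Chars.isspace c = false := by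
  induction t using pvWords.induct with
  | case1 => simp [pvWords]
  | case2 c rest hs ih =>
    rw [pvWords, if_pos hs]; exact ih
  | case3 c rest hs ih =>
    rw [pvWords, if_neg hs]
    intro w hw
    rcases List.mem_cons.mp hw with h | h
    · subst h
      refine ⟨by simp, ?_⟩
      intro x hx
      rcases List.mem_cons.mp hx with h | h
      · subst h; exact Bool.eq_false_iff.mpr hs
      · have := List.mem_takeWhile_imp h
        simpa [pvNonSp] using this
    · exact ih w h

def pvFscan (tg : List Char) : Bool → List Char → Bool
  | b, [] => b && tg.isPrefixOf []
  | b, c :: rest => (b && tg.isPrefixOf (c :: rest)) || pvFscan tg (PySem.Chars.isspace c) rest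

-- (4) a no-space target is a prefix of word++r iff it is a prefix of the word, r space-headed
theorem prefix_run (tg : List Char) (hns : ∀ c ∈ tg, PySem.Chars.isspace c = false) :
    ∀ (tw r : List Char), (∀ c ∈ tw, PySem.Chars.isspace c = false) →
    (∀ c, r.head? = some c → PySem.Chars.isspace c = true) →
    (tg <+: tw ++ r ↔ tg <+: tw) := by
  induction tg with
  | nil => simp
  | cons x tg' ih =>
    intro tw r htw hr
    cases tw with
    | nil =>
      simp only [List.nil_append]
      constructor
      · intro h
        cases r with
        | nil => simp at h
        | cons s r' =>
          have hx : x = s := (List.cons_prefix_cons.mp h).1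
          have := hr s rfl
          have := hns x (by simp)
          rw [hx] at this; rw [this] at *; simp_all
      · intro h; simp at h
    | cons a tw' =>
      simp only [List.cons_append, List.cons_prefix_cons]
      constructor
      · rintro ⟨hax, hp⟩
        refine ⟨hax, ?_⟩
        exact (ih (fun c hc => hns c (by simp [hc])) tw' r (fun c hc => htw c (by simp [hc])) hr).mp hp
      · rintro ⟨hax, hp⟩
        refine ⟨hax, ?_⟩
        exact (ih (fun c hc => hns c (by simp [hc])) tw' r (fun c hc => htw c (by simp [hc])) hr).mpr hp

-- (5) fscan with b = false skips a non-space run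
theorem fscan_false_run (tg : List Char) :
    ∀ (tw r : List Char), (∀ c ∈ tw, PySem.Chars.isspace c = false) →
    pvFscan tg false (tw ++ r) = pvFscan tg false r := by
  intro tw
  induction tw with
  | nil => intro r _; rfl
  | cons a tw' ih =>
    intro r h
    have ha : PySem.Chars.isspace a = false := h a (by simp)
    rw [List.cons_append, pvFscan]
    simp [ha, ih r (fun c hc => h c (by simp [hc]))]

theorem pfx_nil (tg : List Char) (htg : tg ≠ []) : tg.isPrefixOf ([] : List Char) = false := by
  rw [Bool.eq_false_iff]
  intro h
  exact htg (List.prefix_nil.mp (List.isPrefixOf_iff_prefix.mp h))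

theorem dropWhile_head_false {p : Char → Bool} : ∀ (l : List Char) (x : Char) (xs : List Char),
    l.dropWhile p = x :: xs → p x = false := by
  intro l
  induction l with
  | nil => intro x xs h; simp at h
  | cons a l' ih =>
    intro x xs h
    rw [List.dropWhile_cons] at h
    by_cases hp : p a
    · simp [hp] at h; exact ih x xs h
    · simp [hp] at h; rw [← h.1]; exact Bool.eq_false_iff.mpr hp

theorem any_words_eq_fscan (tg : List Char) (htg : tg ≠ [])
    (hns : ∀ c ∈ tg, PySem.Chars.isspace c = false) :
    ∀ (n : Nat) (t : List Char), t.length ≤ n →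
    (pvWords t).any (fun w => tg.isPrefixOf w) = pvFscan tg true t := by
  intro n
  induction n with
  | zero =>
    intro t ht
    have : t = [] := List.eq_nil_of_length_eq_zero (Nat.le_zero.mp ht)
    subst this
    simp [pvWords, pvFscan, pfx_nil tg htg]
  | succ n ih =>
    intro t ht
    cases t with
    | nil => simp [pvWords, pvFscan, pfx_nil tg htg]
    | cons c rest =>
      obtain ⟨x, tg', rfl⟩ : ∃ x tg', tg = x :: tg' := by
        cases tg with
        | nil => exact absurd rfl htg
        | cons a b => exact ⟨a, b, rfl⟩
      have hrest : rest.length ≤ n := Nat.lt_succ_iff.mp (by simpa using ht)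
      by_cases hs : PySem.Chars.isspace c
      · have hpfx : (x :: tg').isPrefixOf (c :: rest) = false := by
          rw [Bool.eq_false_iff]
          intro hcon
          have := (List.cons_prefix_cons.mp (List.isPrefixOf_iff_prefix.mp hcon)).1
          have hx := hns x (by simp)
          rw [← this] at hs
          rw [hs] at hx; simp at hx
        rw [pvWords, if_pos hs, pvFscan]
        simp only [hpfx, Bool.and_false, Bool.false_or, hs]
        -- pvFscan tg true rest vs rest: need words rest = fscan true rest (IH)
        exact ih rest hrest
      · -- non-space head: word = c :: takeWhile
        have hrestsplit : rest.takeWhile pvNonSp ++ rest.dropWhile pvNonSp = rest :=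
          List.takeWhile_append_dropWhile
        have htwns : ∀ d ∈ (c :: rest.takeWhile pvNonSp), PySem.Chars.isspace d = false := by
          intro d hd
          rcases List.mem_cons.mp hd with h | h
          · subst h; exact Bool.eq_false_iff.mpr hs
          · have := List.mem_takeWhile_imp h; simpa [pvNonSp] using this
        have hrhead : ∀ d, (rest.dropWhile pvNonSp).head? = some d → PySem.Chars.isspace d = true := by
          intro d hd
          cases hrc : rest.dropWhile pvNonSp with
          | nil => rw [hrc] at hd; simp at hd
          | cons s r' =>
            rw [hrc] at hd; simp at hd
            subst hd
            simpa [pvNonSp] using dropWhile_head_false rest s r' hrc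
        have hpfx : (x :: tg').isPrefixOf (c :: rest)
            = ((x :: tg').isPrefixOf (c :: rest.takeWhile pvNonSp)) := by
          have h1 : (c :: rest) = (c :: rest.takeWhile pvNonSp) ++ rest.dropWhile pvNonSp := by
            rw [List.cons_append, hrestsplit]
          rw [h1]
          by_cases hq : (x :: tg').isPrefixOf (c :: rest.takeWhile pvNonSp)
          · rw [hq, List.isPrefixOf_iff_prefix]
            exact (prefix_run _ hns _ _ htwns hrhead).mpr (List.isPrefixOf_iff_prefix.mp hq)
          · rw [Bool.eq_false_iff.mpr hq, Bool.eq_false_iff]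
            intro hcon
            exact hq (List.isPrefixOf_iff_prefix.mpr
              ((prefix_run _ hns _ _ htwns hrhead).mp (List.isPrefixOf_iff_prefix.mp hcon)))
        rw [pvWords, if_neg hs, pvFscan]
        simp only [List.any_cons, Bool.true_and, hpfx]
        congr 1
        rw [Bool.eq_false_iff.mpr hs]
        have h2 : pvFscan (x :: tg') false rest
            = pvFscan (x :: tg') false (rest.dropWhile pvNonSp) := by
          conv_lhs => rw [← hrestsplit]
          exact fscan_false_run (x :: tg') _ _ (fun d hd => htwns d (List.mem_cons_of_mem _ hd))
        rw [h2]
        cases hrc : rest.dropWhile pvNonSp with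
        | nil => simp [pvWords, pvFscan, pfx_nil (x :: tg') htg]
        | cons s r' =>
          have hss : PySem.Chars.isspace s = true := by
            simpa [pvNonSp] using dropWhile_head_false rest s r' hrc
          have hr'len : r'.length ≤ n := by
            have h1 : (rest.dropWhile pvNonSp).length ≤ rest.length := List.length_dropWhile_le _ _
            rw [hrc] at h1; simp at h1; omega
          rw [pvWords, if_pos hss, pvFscan]
          have hpfx2 : (x :: tg').isPrefixOf (s :: r') = false := by
            rw [Bool.eq_false_iff]
            intro hcon
            have := (List.cons_prefix_cons.mp (List.isPrefixOf_iff_prefix.mp hcon)).1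
            have hx := hns x (by simp)
            rw [this] at hx; rw [hss] at hx; simp at hx
          simp only [hpfx2, Bool.and_false, Bool.false_or, hss]
          exact ih r' hr'len

-- boundary condition for the position scan
def pvBd (b : Bool) (t : List Char) (j : Nat) : Prop :=
  (j = 0 ∧ b = true) ∨ (∃ k, j = k + 1 ∧ ∃ c, t[k]? = some c ∧ PySem.Chars.isspace c = true)

theorem fscan_iff (tg : List Char) (htg : tg ≠ []) :
    ∀ (t : List Char) (b : Bool),
    pvFscan tg b t = true ↔ ∃ j : Nat, pvBd b t j ∧ tg <+: t.drop j := by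
  intro t
  induction t with
  | nil =>
    intro b
    rw [pvFscan]
    simp only [pfx_nil tg htg, Bool.and_false, Bool.false_eq_true, false_iff]
    rintro ⟨j, hbd, hp⟩
    rw [List.drop_nil] at hp
    exact htg (List.prefix_nil.mp hp)
  | cons c rest ih =>
    intro b
    rw [pvFscan]
    simp only [Bool.or_eq_true, Bool.and_eq_true, ih]
    constructor
    · rintro (⟨hb, hp⟩ | ⟨j, hbd, hp⟩)
      · exact ⟨0, Or.inl ⟨rfl, hb⟩, by simpa using List.isPrefixOf_iff_prefix.mp hp⟩
      · refine ⟨j + 1, ?_, by simpa using hp⟩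
        rcases hbd with ⟨hj0, hb'⟩ | ⟨k, hjk, d, hd, hsd⟩
        · subst hj0
          exact Or.inr ⟨0, rfl, c, by simp, hb'⟩
        · subst hjk
          exact Or.inr ⟨k + 1, rfl, d, by simpa using hd, hsd⟩
    · rintro ⟨j, hbd, hp⟩
      cases j with
      | zero =>
        rcases hbd with ⟨_, hb⟩ | ⟨k, hk, _⟩
        · exact Or.inl ⟨hb, List.isPrefixOf_iff_prefix.mpr (by simpa using hp)⟩
        · omega
      | succ j' =>
        refine Or.inr ⟨j', ?_, by simpa using hp⟩
        rcases hbd with ⟨h0, _⟩ | ⟨k, hk, d, hd, hsd⟩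
        · omega
        · have hkj : k = j' := by omega
          subst hkj
          cases k with
          | zero =>
            simp at hd
            subst hd
            exact Or.inl ⟨rfl, hsd⟩
          | succ k' =>
            exact Or.inr ⟨k', rfl, d, by simpa using hd, hsd⟩


-- ===== assembly: A's side =====

theorem any_congr_mem {α : Type} (l : List α) (p q : α → Bool)
    (h : ∀ a ∈ l, p a = q a) : l.any p = l.any q := by
  induction l with
  | nil => rfl
  | cons x xs ih =>
    simp only [List.any_cons, h x (by simp), ih (fun a ha => h a (by simp [ha]))]

theorem scanA_eq_any (username : String) : ∀ ws : List String,
    isMentionedScanA username ws = ws.any (fun w =>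
      decide (PySem.Str.pyGet? w 0 = some '@') &&
      (PySem.Str.slice w (some 1) (some (PySem.Str.len username + 1)) == username)) := by
  intro ws
  induction ws with
  | nil => rfl
  | cons w rest ih =>
    rw [isMentionedScanA, List.any_cons, ← ih]
    by_cases h1 : PySem.Str.pyGet? w 0 = some '@'
    · rw [if_pos h1, decide_eq_true h1, Bool.true_and]
      by_cases h2 : PySem.Str.slice w (some 1) (some (PySem.Str.len username + 1)) = username
      · rw [if_pos h2, beq_iff_eq.mpr h2, Bool.true_or]
      · rw [if_neg h2, beq_eq_false_iff_ne.mpr h2, Bool.false_or]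
    · rw [if_neg h1, decide_eq_false h1, Bool.false_and, Bool.false_or]

theorem slice_one_toList (w : String) (username : String) :
    (PySem.Str.slice w (some 1) (some (PySem.Str.len username + 1))).toList
      = (w.toList.drop 1).take username.toList.length := by
  rw [PySem.Str.toList_slice, PySem.Chars.slice_eq_listSlice,
    PySem.List.slice_toNat _ (by omega) (by simp [PySem.Str.len]; omega)]
  congr 1

theorem condA_iff (username w : String) (hw : w.toList ≠ []) :
    (decide (PySem.Str.pyGet? w 0 = some '@') &&
      (PySem.Str.slice w (some 1) (some (PySem.Str.len username + 1)) == username))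
      = ('@' :: username.toList).isPrefixOf w.toList := by
  rw [Bool.eq_iff_iff]
  cases hwl : w.toList with
  | nil => exact absurd hwl hw
  | cons d ds =>
    have h0 : PySem.Str.pyGet? w 0 = w.toList[0]? := by simp [PySem.List.pyGet?_zero]
    have heq : (PySem.Str.slice w (some 1) (some (PySem.Str.len username + 1)) == username) = true
        ↔ ds.take username.toList.length = username.toList := by
      rw [beq_iff_eq, ← String.toList_inj, slice_one_toList, hwl]
      simp
    rw [Bool.and_eq_true, decide_eq_true_iff, h0, hwl, heq,
      List.isPrefixOf_iff_prefix, List.cons_prefix_cons]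
    constructor
    · rintro ⟨ha, hb⟩
      refine ⟨by simp at ha; exact ha.symm, ?_⟩
      rw [List.prefix_iff_eq_take, eq_comm]
      exact hb
    · rintro ⟨ha, hb⟩
      refine ⟨by rw [← ha]; simp, ?_⟩
      rw [List.prefix_iff_eq_take, eq_comm] at hb
      exact hb

theorem A_eq_any (tweet username : String) :
    is_mentioned tweet username
      = (pvWords tweet.toList).any (fun wl => ('@' :: username.toList).isPrefixOf wl) := by
  show isMentionedScanA username (PySem.Str.split₀ tweet) = _
  rw [scanA_eq_any]
  have hmap : pvWords tweet.toList = (PySem.Str.split₀ tweet).map String.toList := by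
    rw [PySem.Str.split₀_map_toList, split₀_eq_pvWords]
  rw [hmap, List.any_map]
  apply any_congr_mem
  intro w hwmem
  have hmem : w.toList ∈ pvWords tweet.toList := by
    rw [hmap]; exact List.mem_map_of_mem hwmem
  exact condA_iff username w (pvWords_sound tweet.toList w.toList hmem).1

-- ===== assembly: B's side =====

theorem target_toList (username : String) :
    ("@" ++ username).toList = '@' :: username.toList := by
  simp [String.toList_append]

theorem B_iff (tweet username : String)
    (hsp : username.toList.any PySem.Chars.isspace = false) :
    (is_mentioned_alt tweet username = true
      ↔ ∃ j : Nat, pvBd true tweet.toList j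
          ∧ ('@' :: username.toList) <+: tweet.toList.drop j) := by
  have hlen : PySem.Str.len ("@" ++ username) = (('@' :: username.toList).length : Int) := by
    simp [PySem.Str.len]
  show (if username.toList.any PySem.Chars.isspace then false else _) = true ↔ _
  rw [if_neg (by simp [hsp])]
  simp only [List.any_eq_true]
  constructor
  · rintro ⟨i, hi, hcond⟩
    rw [PySem.List.mem_pyRange_one] at hi
    obtain ⟨hi0, hiu⟩ := hi
    rw [Bool.and_eq_true] at hcond
    obtain ⟨hbd, hslice⟩ := hcond
    refine ⟨i.toNat, ?_, ?_⟩
    · by_cases hz : i = 0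
      · left
        exact ⟨by simp [hz], rfl⟩
      · right
        have hi1 : 1 ≤ i := by omega
        have h : (PySem.Str.pyGet? tweet (i - 1)).elim false PySem.Chars.isspace = true := by
          rw [Bool.or_eq_true] at hbd
          rcases hbd with h | h
          · exact absurd (by simpa using h) hz
          · exact h
        refine ⟨i.toNat - 1, by omega, ?_⟩
        have hcast : i - 1 = ((i.toNat - 1 : Nat) : Int) := by omega
        rw [hcast, PySem.Str.pyGet?_natCast] at h
        cases hg : tweet.toList[(i.toNat - 1 : Nat)]? with
        | none => rw [hg] at h; simp at h
        | some c =>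
          rw [hg] at h
          exact ⟨c, rfl, by simpa using h⟩
    · rw [beq_iff_eq, ← String.toList_inj] at hslice
      rw [hlen] at hslice
      rw [PySem.Str.toList_slice, PySem.Chars.slice_eq_listSlice,
        PySem.List.slice_toNat _ hi0 (by omega), target_toList] at hslice
      have harg : (i + (('@' :: username.toList).length : Int)).toNat - i.toNat
          = ('@' :: username.toList).length := by omega
      rw [harg] at hslice
      rw [List.prefix_iff_eq_take, eq_comm]
      simpa using hslice
  · rintro ⟨j, hbd, hp⟩
    have htgne : ('@' :: username.toList) ≠ [] := by simp
    have hjle : j + ('@' :: username.toList).length ≤ tweet.toList.length := by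
      have h1 := hp.length_le
      rw [List.length_drop] at h1
      by_cases hj : j ≤ tweet.toList.length
      · omega
      · exfalso
        have : tweet.toList.drop j = [] := List.drop_eq_nil_of_le (by omega)
        rw [this] at hp
        exact htgne (List.prefix_nil.mp hp)
    refine ⟨(j : Int), ?_, ?_⟩
    · rw [PySem.List.mem_pyRange_one, hlen]
      have : PySem.Str.len tweet = (tweet.toList.length : Int) := by simp [PySem.Str.len]
      rw [this]
      omega
    · rw [Bool.and_eq_true]
      constructor
      · rw [Bool.or_eq_true]
        rcases hbd with ⟨hj0, _⟩ | ⟨k, hjk, c, hc, hsc⟩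
        · left; simp [hj0]
        · right
          have hcast : (j : Int) - 1 = ((k : Nat) : Int) := by omega
          rw [hcast, PySem.Str.pyGet?_natCast, hc]
          simpa using hsc
      · rw [beq_iff_eq, ← String.toList_inj, hlen]
        rw [PySem.Str.toList_slice, PySem.Chars.slice_eq_listSlice,
          PySem.List.slice_toNat _ (by omega) (by omega), target_toList]
        have harg : ((j:Int) + (('@' :: username.toList).length : Int)).toNat - (j:Int).toNat
            = ('@' :: username.toList).length := by omega
        rw [harg]
        rw [List.prefix_iff_eq_take, eq_comm] at hp
        simpa using hp

-- ===== VERDICT (by name: the statement is the Claim_ definition above) =====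
theorem is_mentioned_spec : Claim_equal_is_mentioned := by
  intro tweet username _
  show is_mentioned tweet username = is_mentioned_alt tweet username
  by_cases hsp : username.toList.any PySem.Chars.isspace
  · -- username contains whitespace: both sides are false
    have hB : is_mentioned_alt tweet username = false := by
      show (if username.toList.any PySem.Chars.isspace then false else _) = false
      rw [if_pos hsp]
    rw [hB, A_eq_any, List.any_eq_false]
    intro wl hwl hcon
    rw [List.isPrefixOf_iff_prefix] at hcon
    obtain ⟨s, hsmem, hss⟩ := List.any_eq_true.mp hsp
    have hsw : s ∈ wl := hcon.subset (by simp [hsmem])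
    have := (pvWords_sound tweet.toList wl hwl).2 s hsw
    rw [this] at hss
    simp at hss
  · have hsp' : username.toList.any PySem.Chars.isspace = false := by
      simpa using hsp
    have htgne : ('@' :: username.toList) ≠ [] := by simp
    have hns : ∀ c ∈ ('@' :: username.toList), PySem.Chars.isspace c = false := by
      intro c hc
      rcases List.mem_cons.mp hc with h | h
      · subst h; decide
      · exact Bool.eq_false_iff.mpr (List.any_eq_false.mp hsp' c h)
    rw [Bool.eq_iff_iff, A_eq_any,
      any_words_eq_fscan ('@' :: username.toList) htgne hns tweet.toList.length tweet.toList le_rfl,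
      fscan_iff ('@' :: username.toList) htgne tweet.toList true,
      B_iff tweet username hsp']
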